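-- pv_equiv track=rewrite | github.com/mykolafc/betsmart | BetOnline/BetOnline.py | makePayloads
-- ===== SOURCE A (Python) =====
-- def makePayloads(gameIdsBySport):
--     nflGameIds = gameIdsBySport.get('NFL')
--     nflPayloads = []
--     if nflGameIds != None:
--         for game_Id in nflGameIds:
--             nflPayloads.append({
--                 "GameID": game_Id,
--                 "Sport": "football",
--                 "League": "nfl",
--                 "ScheduleText": None
--             })
--     nbaGameIds = gameIdsBySport.get('NBA')
--     nbaPayloads = []
--     if nbaGameIds != None:
--         for game_Id in nbaGameIds:
--             nbaPayloads.append({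
--                 "GameID": game_Id,
--                 "Sport": "basketball",
--                 "League": "nba",
--                 "ScheduleText": None
--             })
--     nhlGameIds = gameIdsBySport.get('NHL')
--     nhlPayloads = []
--     if nhlGameIds != None:
--         for game_Id in nhlGameIds:
--             nhlPayloads.append({
--                 "GameID": game_Id,
--                 "Sport": "hockey",
--                 "League": "nhl",
--                 "ScheduleText": None
--             })
--     # BASEBALL
--     mlbGameIds = gameIdsBySport.get('MLB')
--     mlbPayloads = []
--     if mlbGameIds != None:
--         for game_Id in mlbGameIds:
--             mlbPayloads.append({
--                 "GameID": game_Id,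
--                 "Sport": "baseball",
--                 "League": "mlb",
--                 "ScheduleText": None
--             })
--     payloads = nflPayloads + nbaPayloads + nhlPayloads + mlbPayloads
--     return payloads
-- ===== SOURCE B (Python) =====
-- RANK = {'NFL': (0, 'football', 'nfl'),
--         'NBA': (1, 'basketball', 'nba'),
--         'NHL': (2, 'hockey', 'nhl'),
--         'MLB': (3, 'baseball', 'mlb')}
--
--
-- def makePayloads(gameIdsBySport):
--     entries = [RANK[key] + (ids,)
--                for key, ids in gameIdsBySport.items() if key in RANK]
--     entries.sort(key=lambda e: e[0])
--     return [{"GameID": game_id, "Sport": e[1], "League": e[2], "ScheduleText": None}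
--             for e in entries for game_id in e[3]]
-- ===== Notes on version B (the rewrite author's own statement) =====
-- stated objective: alternative
-- what changed: Instead of A's four unrolled per-sport blocks each doing its own dict lookup and building its own list before concatenation, B makes one pass over the dict's items collecting (rank, sport, league, ids) entries via a RANK config map, stably sorts them by rank to restore the NFL/NBA/NHL/MLB order, and flattens once.
import Mathlib
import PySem

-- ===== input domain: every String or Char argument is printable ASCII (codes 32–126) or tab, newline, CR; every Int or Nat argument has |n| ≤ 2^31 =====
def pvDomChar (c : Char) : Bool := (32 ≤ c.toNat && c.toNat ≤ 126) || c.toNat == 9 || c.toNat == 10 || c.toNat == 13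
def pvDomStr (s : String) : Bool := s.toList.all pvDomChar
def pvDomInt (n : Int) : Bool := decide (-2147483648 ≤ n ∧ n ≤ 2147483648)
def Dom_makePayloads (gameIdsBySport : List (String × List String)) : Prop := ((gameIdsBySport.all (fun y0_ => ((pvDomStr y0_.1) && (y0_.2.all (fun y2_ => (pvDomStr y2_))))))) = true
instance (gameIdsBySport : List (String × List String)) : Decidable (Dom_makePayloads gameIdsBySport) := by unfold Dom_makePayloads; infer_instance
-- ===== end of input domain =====

-- B: one pass over the dict's items with a rank/config map, then a stable sort by rank and a
-- single flatten — instead of A's four per-sport lookups each building its own list (objective: alternative).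

-- ===== PORT A =====
-- literal transliteration: four blocks, each builds its own list by appending, then concatenate
def makePayloads (gameIdsBySport : List (String × List String)) : List (List (String × Option String)) :=
  let nflGameIds := (PySem.Dict.mk gameIdsBySport).get? "NFL"
  let nflPayloads : List (List (String × Option String)) := []
  let nflPayloads := match nflGameIds with
    | none => nflPayloads
    | some (ids : List String) => ids.foldl (fun acc game_Id => acc ++
        [[("GameID", some game_Id), ("Sport", some "football"), ("League", some "nfl"), ("ScheduleText", (none : Option String))]]) nflPayloads
  let nbaGameIds := (PySem.Dict.mk gameIdsBySport).get? "NBA"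
  let nbaPayloads : List (List (String × Option String)) := []
  let nbaPayloads := match nbaGameIds with
    | none => nbaPayloads
    | some (ids : List String) => ids.foldl (fun acc game_Id => acc ++
        [[("GameID", some game_Id), ("Sport", some "basketball"), ("League", some "nba"), ("ScheduleText", (none : Option String))]]) nbaPayloads
  let nhlGameIds := (PySem.Dict.mk gameIdsBySport).get? "NHL"
  let nhlPayloads : List (List (String × Option String)) := []
  let nhlPayloads := match nhlGameIds with
    | none => nhlPayloads
    | some (ids : List String) => ids.foldl (fun acc game_Id => acc ++
        [[("GameID", some game_Id), ("Sport", some "hockey"), ("League", some "nhl"), ("ScheduleText", (none : Option String))]]) nhlPayloads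
  let mlbGameIds := (PySem.Dict.mk gameIdsBySport).get? "MLB"
  let mlbPayloads : List (List (String × Option String)) := []
  let mlbPayloads := match mlbGameIds with
    | none => mlbPayloads
    | some (ids : List String) => ids.foldl (fun acc game_Id => acc ++
        [[("GameID", some game_Id), ("Sport", some "baseball"), ("League", some "mlb"), ("ScheduleText", (none : Option String))]]) mlbPayloads
  nflPayloads ++ nbaPayloads ++ nhlPayloads ++ mlbPayloads

-- ===== PORT B =====
-- the module-level RANK map of Source B
def pvRANK : PySem.Dict String (Int × String × String) :=
  PySem.Dict.mk [("NFL", (0, "football", "nfl")), ("NBA", (1, "basketball", "nba")),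
                 ("NHL", (2, "hockey", "nhl")), ("MLB", (3, "baseball", "mlb"))]

def makePayloads_alt (gameIdsBySport : List (String × List String)) : List (List (String × Option String)) :=
  -- [RANK[key] + (ids,) for key, ids in gameIdsBySport.items() if key in RANK]
  let entries := (PySem.Dict.mk gameIdsBySport).items.filterMap (fun p =>
      match pvRANK.get? p.1 with
      | some rsl => some (rsl.1, rsl.2.1, rsl.2.2, p.2)
      | none => none)
  -- entries.sort(key=lambda e: e[0])
  let entries := PySem.List.sorted entries (fun e => e.1) false
  -- the final flattening comprehension
  entries.flatMap (fun e => e.2.2.2.map (fun game_id =>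
      [("GameID", some game_id), ("Sport", some e.2.1), ("League", some e.2.2.1), ("ScheduleText", (none : Option String))]))

-- ===== PRECONDITION & SPEC =====
-- Pre_ requires distinct keys: the association list encodes a Python dict, whose keys are
-- necessarily distinct; on duplicate keys (unrepresentable in Python) A's first-match lookup
-- and B's iteration over all items are both accidental, so such lists are excluded.
def Pre_makePayloads (gameIdsBySport : List (String × List String)) : Prop :=
  (gameIdsBySport.map Prod.fst).Nodup
instance (gameIdsBySport : List (String × List String)) : Decidable (Pre_makePayloads gameIdsBySport) := by unfold Pre_makePayloads; infer_instance

def pvWitness_makePayloads : (List (String × List String)) :=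
  [("NBA", ["101", "102"]), ("MLB", []), ("XFL", ["9"]), ("NFL", ["7"])]

def Spec_makePayloads (gameIdsBySport : List (String × List String)) (out : List (List (String × Option String))) : Prop := out = makePayloads_alt gameIdsBySport
instance (gameIdsBySport : List (String × List String)) (out : List (List (String × Option String))) : Decidable (Spec_makePayloads gameIdsBySport out) := by unfold Spec_makePayloads; infer_instance

-- ===== CLAIM (what is proved, stated in full; the proofs are below) =====
def Claim_equal_makePayloads : Prop := ∀ (gameIdsBySport : List (String × List String)), Dom_makePayloads gameIdsBySport → Pre_makePayloads gameIdsBySport → Spec_makePayloads gameIdsBySport (makePayloads gameIdsBySport)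

-- ===== LEMMAS AND PROOFS =====

-- the entries list built by B's first comprehension
def pvEntries (g : List (String × List String)) : List (Int × String × String × List String) :=
  g.filterMap (fun p =>
    match pvRANK.get? p.1 with
    | some rsl => some (rsl.1, rsl.2.1, rsl.2.2, p.2)
    | none => none)

-- what one per-sport block of A contributes
def pvBlock (o : Option (List String)) (sport league : String) : List (List (String × Option String)) :=
  match o with
  | none => []
  | some ids => ids.map (fun gid =>
      [("GameID", some gid), ("Sport", some sport), ("League", some league), ("ScheduleText", (none : Option String))])

-- bucket of entries with rank r
def pvF (r : Int) (g : List (String × List String)) : List (Int × String × String × List String) :=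
  (pvEntries g).filter (fun e => e.1 == r)

theorem pvRANK_cases (k : String) (rsl : Int × String × String)
    (h : pvRANK.get? k = some rsl) :
    (k = "NFL" ∧ rsl = (0, "football", "nfl")) ∨ (k = "NBA" ∧ rsl = (1, "basketball", "nba")) ∨
    (k = "NHL" ∧ rsl = (2, "hockey", "nhl")) ∨ (k = "MLB" ∧ rsl = (3, "baseball", "mlb")) := by
  simp only [pvRANK, PySem.Dict.get?_mk_cons] at h
  split_ifs at h with h1 h2 h3 h4
  · exact Or.inl ⟨(eq_of_beq h1).symm, by injection h with h'; exact h'.symm⟩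
  · exact Or.inr (Or.inl ⟨(eq_of_beq h2).symm, by injection h with h'; exact h'.symm⟩)
  · exact Or.inr (Or.inr (Or.inl ⟨(eq_of_beq h3).symm, by injection h with h'; exact h'.symm⟩))
  · exact Or.inr (Or.inr (Or.inr ⟨(eq_of_beq h4).symm, by injection h with h'; exact h'.symm⟩))
  · simp [PySem.Dict.get?] at h

theorem pvF_nil (t : List (String × List String)) (k : String) (r : Int)
    (hinj : ∀ k' rsl', pvRANK.get? k' = some rsl' → rsl'.1 = r → k' = k)
    (hnk : k ∉ t.map Prod.fst) : pvF r t = [] := by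
  induction t with
  | nil => rfl
  | cons p t ih =>
      simp only [List.map_cons, List.mem_cons, not_or] at hnk
      have ih' := ih hnk.2
      unfold pvF pvEntries at *
      cases hc : pvRANK.get? p.1 with
      | none => simpa [hc] using ih'
      | some rsl =>
          simp only [List.filterMap_cons, hc, List.filter_cons]
          have hne : (rsl.1 == r) = false := by
            by_contra hb
            have : rsl.1 = r := by
              cases hbe : (rsl.1 == r) <;> simp_all
            exact hnk.1 (hinj p.1 rsl hc this).symm
          simpa [hne] using ih'

theorem pvF_eq (g : List (String × List String)) (hnd : (g.map Prod.fst).Nodup)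
    (k : String) (r : Int) (s l : String)
    (hk : pvRANK.get? k = some (r, s, l))
    (hinj : ∀ k' rsl', pvRANK.get? k' = some rsl' → rsl'.1 = r → k' = k) :
    pvF r g = (match (PySem.Dict.mk g).get? k with
               | none => []
               | some ids => [(r, s, l, ids)]) := by
  induction g with
  | nil => simp [pvF, pvEntries, PySem.Dict.get?]
  | cons p t ih =>
      simp only [List.map_cons, List.nodup_cons] at hnd
      have hget : (PySem.Dict.mk (p :: t)).get? k
          = if (p.1 == k) = true then some p.2 else (PySem.Dict.mk t).get? k := by
        cases p; exact PySem.Dict.get?_mk_cons _ _ _ _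
      cases hc : pvRANK.get? p.1 with
      | none =>
          have hpk : p.1 ≠ k := fun he => by rw [he, hk] at hc; simp at hc
          have : (p.1 == k) = false := beq_eq_false_iff_ne.mpr hpk
          rw [hget, this]
          simp only [Bool.false_eq_true, if_false]
          rw [← ih hnd.2]
          unfold pvF pvEntries
          simp [hc]
      | some rsl =>
          by_cases hr : rsl.1 = r
          · have hpk : p.1 = k := hinj p.1 rsl hc hr
            have hrsl : rsl = (r, s, l) := by rw [hpk, hk] at hc; injection hc with h'; exact h'.symm
            have hbk : (p.1 == k) = true := beq_iff_eq.mpr hpk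
            rw [hget, hbk]
            simp only [if_true]
            have htail : pvF r t = [] := by
              apply pvF_nil t k r hinj
              rw [← hpk]; exact hnd.1
            unfold pvF pvEntries at htail ⊢
            simp [hc, hrsl, htail]
          · have hpk : p.1 ≠ k := fun he => by
              rw [he, hk] at hc; injection hc with h'; exact hr (by rw [← h'])
            have hbk : (p.1 == k) = false := beq_eq_false_iff_ne.mpr hpk
            rw [hget, hbk]
            simp only [Bool.false_eq_true, if_false]
            rw [← ih hnd.2]
            unfold pvF pvEntries
            have : (rsl.1 == r) = false := beq_eq_false_iff_ne.mpr hr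
            simp [hc, this]

-- every entry's rank is one of 0,1,2,3
theorem pvEntries_rank (g : List (String × List String)) :
    ∀ e ∈ pvEntries g, e.1 = 0 ∨ e.1 = 1 ∨ e.1 = 2 ∨ e.1 = 3 := by
  intro e he
  simp only [pvEntries, List.mem_filterMap] at he
  obtain ⟨p, _, hp⟩ := he
  cases hc : pvRANK.get? p.1 with
  | none => rw [hc] at hp; simp at hp
  | some rsl =>
      rw [hc] at hp
      injection hp with h'
      rcases pvRANK_cases p.1 rsl hc with ⟨_, h⟩ | ⟨_, h⟩ | ⟨_, h⟩ | ⟨_, h⟩ <;>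
        subst h <;> rw [← h'] <;> simp

theorem pv_perm_four (l : List (Int × String × String × List String))
    (h : ∀ e ∈ l, e.1 = 0 ∨ e.1 = 1 ∨ e.1 = 2 ∨ e.1 = 3) :
    (l.filter (fun e => e.1 == 0) ++ l.filter (fun e => e.1 == 1) ++
     l.filter (fun e => e.1 == 2) ++ l.filter (fun e => e.1 == 3)).Perm l := by
  induction l with
  | nil => simp
  | cons x t ih =>
      have ih' := ih (fun e he => h e (List.mem_cons_of_mem x he))
      rcases h x (List.mem_cons_self) with hx | hx | hx | hx <;>
      · norm_num [List.filter_cons, hx]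
        simp only [← List.append_assoc]
        first
          | simpa [List.append_assoc] using ih'
          | · refine List.Perm.trans List.perm_middle (List.Perm.cons x ?_)
              simpa [List.append_assoc] using ih'

theorem pv_flatten_singleton {α β : Type} (f : α → β) (l : List α) :
    (l.map (fun x => [f x])).flatten = l.map f := by
  induction l with
  | nil => rfl
  | cons x t ih => simp [ih]

theorem pv_sorted_entries (g : List (String × List String))
    (hnd : (g.map Prod.fst).Nodup) :
    PySem.List.sorted (pvEntries g) (fun e => e.1) false
      = pvF 0 g ++ pvF 1 g ++ pvF 2 g ++ pvF 3 g := by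
  apply PySem.List.sorted_eq_of_perm_of_pairwise_lt
  · exact pv_perm_four (pvEntries g) (pvEntries_rank g)
  · have h0 := pvF_eq g hnd "NFL" 0 "football" "nfl" (by decide)
      (by intro k' rsl' h' hr; rcases pvRANK_cases k' rsl' h' with ⟨hk, he⟩|⟨hk, he⟩|⟨hk, he⟩|⟨hk, he⟩ <;> subst he <;> simp_all)
    have h1 := pvF_eq g hnd "NBA" 1 "basketball" "nba" (by decide)
      (by intro k' rsl' h' hr; rcases pvRANK_cases k' rsl' h' with ⟨hk, he⟩|⟨hk, he⟩|⟨hk, he⟩|⟨hk, he⟩ <;> subst he <;> simp_all)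
    have h2 := pvF_eq g hnd "NHL" 2 "hockey" "nhl" (by decide)
      (by intro k' rsl' h' hr; rcases pvRANK_cases k' rsl' h' with ⟨hk, he⟩|⟨hk, he⟩|⟨hk, he⟩|⟨hk, he⟩ <;> subst he <;> simp_all)
    have h3 := pvF_eq g hnd "MLB" 3 "baseball" "mlb" (by decide)
      (by intro k' rsl' h' hr; rcases pvRANK_cases k' rsl' h' with ⟨hk, he⟩|⟨hk, he⟩|⟨hk, he⟩|⟨hk, he⟩ <;> subst he <;> simp_all)
    rw [h0, h1, h2, h3]
    cases (PySem.Dict.mk g).get? "NFL" <;> cases (PySem.Dict.mk g).get? "NBA" <;>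
      cases (PySem.Dict.mk g).get? "NHL" <;> cases (PySem.Dict.mk g).get? "MLB" <;>
      simp [List.pairwise_cons]

-- ===== VERDICT (by name: the statement is the Claim_ definition above) =====
theorem makePayloads_spec : Claim_equal_makePayloads := by
  intro g _ hpre
  unfold Spec_makePayloads makePayloads makePayloads_alt
  have hitems : (PySem.Dict.mk g).items = g := rfl
  rw [hitems]
  show _ = (PySem.List.sorted (pvEntries g) (fun e => e.1) false).flatMap _
  rw [pv_sorted_entries g hpre]
  have h0 := pvF_eq g hpre "NFL" 0 "football" "nfl" (by decide)
    (by intro k' rsl' h' hr; rcases pvRANK_cases k' rsl' h' with ⟨hk, he⟩|⟨hk, he⟩|⟨hk, he⟩|⟨hk, he⟩ <;> subst he <;> simp_all)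
  have h1 := pvF_eq g hpre "NBA" 1 "basketball" "nba" (by decide)
    (by intro k' rsl' h' hr; rcases pvRANK_cases k' rsl' h' with ⟨hk, he⟩|⟨hk, he⟩|⟨hk, he⟩|⟨hk, he⟩ <;> subst he <;> simp_all)
  have h2 := pvF_eq g hpre "NHL" 2 "hockey" "nhl" (by decide)
    (by intro k' rsl' h' hr; rcases pvRANK_cases k' rsl' h' with ⟨hk, he⟩|⟨hk, he⟩|⟨hk, he⟩|⟨hk, he⟩ <;> subst he <;> simp_all)
  have h3 := pvF_eq g hpre "MLB" 3 "baseball" "mlb" (by decide)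
    (by intro k' rsl' h' hr; rcases pvRANK_cases k' rsl' h' with ⟨hk, he⟩|⟨hk, he⟩|⟨hk, he⟩|⟨hk, he⟩ <;> subst he <;> simp_all)
  rw [h0, h1, h2, h3]
  cases (PySem.Dict.mk g).get? "NFL" <;> cases (PySem.Dict.mk g).get? "NBA" <;>
    cases (PySem.Dict.mk g).get? "NHL" <;> cases (PySem.Dict.mk g).get? "MLB" <;>
    simp [pv_flatten_singleton]
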